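-- pv_equiv track=rewrite | github.com/FalseR20/FalseR_BANK | dj/mainapp/functions.py | make_iban
-- ===== SOURCE A (Python) =====
-- def make_iban(curr: str, acc_type: str, number: str) -> str:
--     acc = curr + acc_type + number
--     acc_numbers = ""
--     for char in acc:
--         num = ord(char)
--         acc_numbers += str(num - 55) if num >= 65 else char
--     control = 98 - (int("15212827" + acc_numbers + "113400") % 97)  # *FLSR* + acc_numbers + *BY00*
--     return "BY" + "%02d" % control + "FLSR" + acc
-- ===== SOURCE B (Python) =====
-- def make_iban(curr: str, acc_type: str, number: str) -> str:
--     # Streaming mod-97: never builds the digit string or the big integer.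
--     acc = curr + acc_type + number
--     rem = 15212827 % 97  # digits of "FLSR" expanded (F=15, L=21, S=28, R=27)
--     for ch in acc:
--         o = ord(ch)
--         if o >= 65:
--             rem = (rem * 100 + o - 55) % 97  # letters expand to two digits
--         else:
--             rem = (rem * 10 + o - 48) % 97  # a digit feeds one digit
--     control = 98 - (rem * 1000000 + 113400) % 97  # trailing "BY00" -> "113400"
--     return f"BY{control:02d}FLSR{acc}"
-- ===== Notes on version B (the rewrite author's own statement) =====
-- stated objective: alternative
-- what changed: A concatenates a per-character digit expansion into one big numeric string and parses it with int() before taking % 97; B never builds the string or the big integer: it streams a single O(1) remainder with modular arithmetic (rem = (rem*weight + value) % 97 per character), trading big-integer parsing for constant-space Horner evaluation.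
import Mathlib
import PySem

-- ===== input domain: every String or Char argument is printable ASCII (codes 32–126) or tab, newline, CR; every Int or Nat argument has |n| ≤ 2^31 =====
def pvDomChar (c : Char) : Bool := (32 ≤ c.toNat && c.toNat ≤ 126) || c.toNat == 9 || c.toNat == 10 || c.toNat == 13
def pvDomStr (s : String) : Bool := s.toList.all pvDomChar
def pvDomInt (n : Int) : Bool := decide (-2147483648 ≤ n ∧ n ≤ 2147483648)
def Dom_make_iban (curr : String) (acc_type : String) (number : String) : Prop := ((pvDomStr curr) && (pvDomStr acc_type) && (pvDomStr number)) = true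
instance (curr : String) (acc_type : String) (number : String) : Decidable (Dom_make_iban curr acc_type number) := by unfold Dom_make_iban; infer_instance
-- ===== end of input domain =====

-- B replaces A's build-big-digit-string-then-int()%97 by a streamed mod-97 remainder
-- (one Horner step per character, O(1) state); same return value wherever A returns.

-- ===== PORT A =====

-- value of an all-ASCII-digit character list read left to right, Horner style, seeded with r
def pvDigitsVal (r : Int) (cs : List Char) : Int :=
  cs.foldl (fun a c => a * 10 + ((c.toNat : Int) - 48) ) r

-- Hand port of `int(...)` at A's single call site, where the argument is the sandwich
-- "15212827" ++ body ++ "113400" (it begins and ends with digit literals).  On such a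
-- string Python's int() returns iff every character is an ASCII digit (a sign, space or
-- underscore would sit strictly between digits and raise ValueError) and the string has
-- at most 4300 digits (CPython's int_max_str_digits limit); the value is then the decimal
-- reading.  Exact there; `none` marks exactly the inputs where Python raises (excluded by
-- Pre_).  (PySem.Int.ofStr? computes the same values but its parser internals are private
-- to the prelude, so this call site is ported by hand to keep the proof possible.)
def pvIntSandwich? (cs : List Char) : Option Int :=
  if cs ≠ [] ∧ cs.all Char.isDigit ∧ cs.length ≤ 4300 then some (pvDigitsVal 0 cs) else none

-- the digit expansion A appends for one character: str(num - 55) if num >= 65 else char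
def pvExpand (ch : Char) : List Char :=
  if 65 ≤ (ch.toNat : Int) then PySem.Int.toChars ((ch.toNat : Int) - 55) else [ch]

-- Python's "%02d" % n (the same formatting as f"{n:02d}"): zero-pad to width 2
def pvFmt02 (n : Int) : List Char :=
  if 0 ≤ n ∧ n < 10 then '0' :: PySem.Int.toChars n else PySem.Int.toChars n

def make_iban (curr : String) (acc_type : String) (number : String) : String :=
  let acc : List Char := curr.toList ++ acc_type.toList ++ number.toList
  let accNumbers : List Char := acc.foldl (fun s ch => s ++ pvExpand ch) []
  let n : Int :=
    (pvIntSandwich? (('1'::'5'::'2'::'1'::'2'::'8'::'2'::'7'::[]) ++ accNumbers ++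
      ('1'::'1'::'3'::'4'::'0'::'0'::[]))).getD 0
  let control : Int := 98 - PySem.Int.mod n 97
  String.ofList (('B'::'Y'::[]) ++ pvFmt02 control ++ ('F'::'L'::'S'::'R'::[]) ++ acc)

-- ===== PORT B =====

def make_iban_alt (curr : String) (acc_type : String) (number : String) : String :=
  let acc : List Char := curr.toList ++ acc_type.toList ++ number.toList
  let rem0 : Int := PySem.Int.mod 15212827 97
  let rem1 : Int :=
    acc.foldl (fun r ch =>
      if 65 ≤ (ch.toNat : Int) then PySem.Int.mod (r * 100 + ((ch.toNat : Int) - 55)) 97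
      else PySem.Int.mod (r * 10 + ((ch.toNat : Int) - 48)) 97) rem0
  let control : Int := 98 - PySem.Int.mod (rem1 * 1000000 + 113400) 97
  String.ofList (('B'::'Y'::[]) ++ pvFmt02 control ++ ('F'::'L'::'S'::'R'::[]) ++ acc)

-- ===== PRECONDITION & SPEC =====

-- Pre_ = exactly the inputs on which Python A returns: every character of
-- curr+acc_type+number is an ASCII digit or has code ≥ 65 (otherwise int() meets a
-- non-digit between digits and raises ValueError), and the built numeral has at most
-- 4300 digits = 14 + (1 per digit char, 2 per code ≥ 65 char) (otherwise CPython's int()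
-- raises "ValueError: Exceeds the limit for integer string conversion").
def Pre_make_iban (curr : String) (acc_type : String) (number : String) : Prop :=
  ((curr.toList ++ acc_type.toList ++ number.toList).all
      (fun c => c.isDigit || decide (65 ≤ c.toNat))) = true ∧
  14 + ((curr.toList ++ acc_type.toList ++ number.toList).map
          (fun c => if c.isDigit then (1 : Nat) else 2)).sum ≤ 4300

instance (curr : String) (acc_type : String) (number : String) : Decidable (Pre_make_iban curr acc_type number) := by
  unfold Pre_make_iban; infer_instance

def pvWitness_make_iban : String × String × String := ("BYN", "1", "2")

def Spec_make_iban (curr : String) (acc_type : String) (number : String) (out : String) : Prop := out = make_iban_alt curr acc_type number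
instance (curr : String) (acc_type : String) (number : String) (out : String) : Decidable (Spec_make_iban curr acc_type number out) := by unfold Spec_make_iban; infer_instance

-- ===== CLAIM (what is proved, stated in full; the proofs are below) =====
def Claim_equal_make_iban : Prop := ∀ (curr : String) (acc_type : String) (number : String), Dom_make_iban curr acc_type number → Pre_make_iban curr acc_type number → Spec_make_iban curr acc_type number (make_iban curr acc_type number)

-- ===== LEMMAS AND PROOFS =====

theorem pv_toDigits_two (n : Nat) (h1 : 10 ≤ n) (h2 : n ≤ 99) :
    Nat.toDigits 10 n = [Nat.digitChar (n / 10), Nat.digitChar (n % 10)] := by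
  obtain ⟨m, rfl⟩ : ∃ m, n = m + 10 := ⟨n - 10, by omega⟩
  simp [Nat.toDigits, Nat.toDigitsCore]
  rw [if_pos (by omega : m / 10 + 1 < 10)]
  have e1 : (m / 10 + 1) % 10 = (m + 10) / 10 := by omega
  have e2 : m % 10 = (m + 10) % 10 := by omega
  rw [e1, e2]
  have e3 : (m + 10) / 10 = m / 10 + 1 := by omega
  rw [e3]

theorem pv_digitChar_toNat (a : Nat) (h : a < 10) : (Nat.digitChar a).toNat = 48 + a := by
  interval_cases a <;> decide

theorem pv_digitChar_isDigit (a : Nat) (h : a < 10) : (Nat.digitChar a).isDigit = true := by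
  interval_cases a <;> decide

theorem pv_toChars_char (n : Nat) (h1 : 10 ≤ n) (h2 : n ≤ 99) :
    PySem.Int.toChars (n : Int) = [Nat.digitChar (n / 10), Nat.digitChar (n % 10)] := by
  have h : ¬ ((n : Int) < 0) := by omega
  simp [PySem.Int.toChars, h, pv_toDigits_two n h1 h2]

theorem pv_val_toChars (n : Nat) (h1 : 10 ≤ n) (h2 : n ≤ 99) (r : Int) :
    pvDigitsVal r (PySem.Int.toChars (n : Int)) = r * 100 + n := by
  rw [pv_toChars_char n h1 h2]
  simp [pvDigitsVal, List.foldl, pv_digitChar_toNat (n / 10) (by omega),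
    pv_digitChar_toNat (n % 10) (by omega)]
  omega

theorem pv_all_toChars (n : Nat) (h1 : 10 ≤ n) (h2 : n ≤ 99) :
    (PySem.Int.toChars (n : Int)).all Char.isDigit = true := by
  rw [pv_toChars_char n h1 h2]
  simp [pv_digitChar_isDigit (n / 10) (by omega), pv_digitChar_isDigit (n % 10) (by omega)]

theorem pv_len_toChars (n : Nat) (h1 : 10 ≤ n) (h2 : n ≤ 99) :
    (PySem.Int.toChars (n : Int)).length = 2 := by
  rw [pv_toChars_char n h1 h2]; rfl

-- mod-97 absorption: a Horner step may be taken modulo 97 at every stage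
theorem pv_mod_absorb (a k b : Int) :
    PySem.Int.mod (PySem.Int.mod a 97 * k + b) 97 = PySem.Int.mod (a * k + b) 97 := by
  rw [PySem.Int.mod_eq_emod_of_pos (by norm_num), PySem.Int.mod_eq_emod_of_pos (by norm_num),
    PySem.Int.mod_eq_emod_of_pos (by norm_num)]
  conv_rhs => rw [Int.add_emod, Int.mul_emod]
  conv_lhs => rw [Int.add_emod, Int.mul_emod, Int.emod_emod_of_dvd _ dvd_rfl]

theorem pv_val_append (r : Int) (xs ys : List Char) :
    pvDigitsVal r (xs ++ ys) = pvDigitsVal (pvDigitsVal r xs) ys := by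
  simp [pvDigitsVal, List.foldl_append]

-- main streaming invariant: B's fold computes the mod-97 of A's Horner value
theorem pv_stream (acc : List Char)
    (hD : ∀ c ∈ acc, c.toNat ≤ 126)
    (hP : ∀ c ∈ acc, c.isDigit = true ∨ 65 ≤ c.toNat) (r : Int) :
    acc.foldl (fun r ch =>
      if 65 ≤ (ch.toNat : Int) then PySem.Int.mod (r * 100 + ((ch.toNat : Int) - 55)) 97
      else PySem.Int.mod (r * 10 + ((ch.toNat : Int) - 48)) 97) (PySem.Int.mod r 97) =
    PySem.Int.mod (pvDigitsVal r (acc.flatMap pvExpand)) 97 := by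
  induction acc generalizing r with
  | nil => simp [pvDigitsVal]
  | cons ch tl ih =>
    have hD' : ∀ c ∈ tl, c.toNat ≤ 126 := fun c hc => hD c (List.mem_cons_of_mem _ hc)
    have hP' : ∀ c ∈ tl, c.isDigit = true ∨ 65 ≤ c.toNat := fun c hc => hP c (List.mem_cons_of_mem _ hc)
    simp only [List.foldl_cons, List.flatMap_cons]
    by_cases hch : 65 ≤ (ch.toNat : Int)
    · rw [if_pos hch, pv_mod_absorb, ih hD' hP', pv_val_append]
      have hn : (ch.toNat : Int) - 55 = ((ch.toNat - 55 : Nat) : Int) := by omega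
      have h1 : 10 ≤ ch.toNat - 55 := by omega
      have h2 : ch.toNat - 55 ≤ 99 := by
        have := hD ch (List.mem_cons_self ..); omega
      rw [show pvExpand ch = PySem.Int.toChars ((ch.toNat : Int) - 55) from if_pos hch]
      rw [hn, pv_val_toChars _ h1 h2]
    · rw [if_neg hch, pv_mod_absorb, ih hD' hP' (r * 10 + ((ch.toNat : Int) - 48))]
      rw [show pvExpand ch = [ch] from if_neg hch]
      congr 1

theorem pv_isDigit_iff (c : Char) : c.isDigit = true ↔ 48 ≤ c.toNat ∧ c.toNat ≤ 57 := by
  simp only [Char.isDigit, Bool.and_eq_true, decide_eq_true_eq, ge_iff_le]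
  rw [UInt32.le_iff_toNat_le, UInt32.le_iff_toNat_le]
  rw [show ('0'.val.toNat) = 48 from rfl, show ('9'.val.toNat) = 57 from rfl]
  exact Iff.rfl

theorem pv_expand_digit (c : Char) (h : c.isDigit = true) : pvExpand c = [c] := by
  rw [pv_isDigit_iff] at h
  exact if_neg (by omega)

theorem pv_expand_letter (c : Char) (h : 65 ≤ c.toNat) :
    pvExpand c = PySem.Int.toChars (((c.toNat - 55 : Nat) : Int)) := by
  rw [show pvExpand c = PySem.Int.toChars ((c.toNat : Int) - 55) from if_pos (by omega)]
  congr 1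
  omega

-- the guard of the hand-ported int() holds on Pre_ inputs
theorem pv_guard (acc : List Char)
    (hD : ∀ c ∈ acc, c.toNat ≤ 126)
    (hP : ∀ c ∈ acc, c.isDigit = true ∨ 65 ≤ c.toNat)
    (hL : 14 + (acc.map (fun c => if c.isDigit then (1 : Nat) else 2)).sum ≤ 4300) :
    (('1'::'5'::'2'::'1'::'2'::'8'::'2'::'7'::[]) ++ acc.flatMap pvExpand ++
      ('1'::'1'::'3'::'4'::'0'::'0'::[]) ≠ []) ∧
    (('1'::'5'::'2'::'1'::'2'::'8'::'2'::'7'::[]) ++ acc.flatMap pvExpand ++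
      ('1'::'1'::'3'::'4'::'0'::'0'::[])).all Char.isDigit = true ∧
    (('1'::'5'::'2'::'1'::'2'::'8'::'2'::'7'::[]) ++ acc.flatMap pvExpand ++
      ('1'::'1'::'3'::'4'::'0'::'0'::[])).length ≤ 4300 := by
  have hmap : acc.map (fun c => (pvExpand c).length) =
      acc.map (fun c => if c.isDigit then (1 : Nat) else 2) := by
    apply List.map_congr_left
    intro c hc
    rcases hP c hc with h | h
    · rw [pv_expand_digit c h, if_pos h]; rfl
    · have hnd : ¬ (c.isDigit = true) := by
        rw [pv_isDigit_iff]; omega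
      rw [pv_expand_letter c h, if_neg hnd,
        pv_len_toChars _ (by omega) (by have := hD c hc; omega)]
  have hall : ∀ a ∈ acc, ∀ c ∈ pvExpand a, c.isDigit = true := by
    intro a ha c hc
    rcases hP a ha with h | h
    · rw [pv_expand_digit a h] at hc
      simp at hc; subst hc; exact h
    · rw [pv_expand_letter a h] at hc
      have := pv_all_toChars (a.toNat - 55) (by omega) (by have := hD a ha; omega)
      rw [List.all_eq_true] at this
      exact this c hc
  refine ⟨by simp, ?_, ?_⟩
  · rw [List.all_append, List.all_append]
    refine Bool.and_eq_true_iff.mpr ⟨Bool.and_eq_true_iff.mpr ⟨by decide, ?_⟩, by decide⟩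
    rw [List.all_eq_true]
    intro c hc
    rw [List.mem_flatMap] at hc
    obtain ⟨a, ha, hca⟩ := hc
    exact hall a ha c hca
  · simp only [List.length_append, List.length_flatMap, hmap]
    simp at hL ⊢
    omega

-- A's loop builds the flat expansion
theorem pv_accNumbers_eq (acc : List Char) :
    acc.foldl (fun s ch => s ++ pvExpand ch) [] = acc.flatMap pvExpand := by
  simpa using PySem.List.foldl_append_eq_flatMap pvExpand acc []

theorem pv_val_suffix (M : Int) :
    pvDigitsVal M ('1'::'1'::'3'::'4'::'0'::'0'::[]) = M * 1000000 + 113400 := by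
  simp [pvDigitsVal, List.foldl]
  ring

theorem pv_main : ∀ (curr : String) (acc_type : String) (number : String),
    Dom_make_iban curr acc_type number → Pre_make_iban curr acc_type number →
    make_iban curr acc_type number = make_iban_alt curr acc_type number := by
  intro curr acc_type number hDom hPre
  obtain ⟨hP0, hL⟩ := hPre
  have hD : ∀ c ∈ curr.toList ++ acc_type.toList ++ number.toList, c.toNat ≤ 126 := by
    simp only [Dom_make_iban, Bool.and_eq_true, pvDomStr, List.all_eq_true, pvDomChar] at hDom
    obtain ⟨⟨h1, h2⟩, h3⟩ := hDom
    intro c hc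
    rcases List.mem_append.mp hc with hc' | hc'
    · rcases List.mem_append.mp hc' with hc'' | hc''
      · have := h1 c hc''; simp at this; omega
      · have := h2 c hc''; simp at this; omega
    · have := h3 c hc'; simp at this; omega
  have hP : ∀ c ∈ curr.toList ++ acc_type.toList ++ number.toList,
      c.isDigit = true ∨ 65 ≤ c.toNat := by
    rw [List.all_eq_true] at hP0
    intro c hc
    have := hP0 c hc
    simp at this
    tauto
  have hg := pv_guard _ hD hP hL
  simp only [make_iban, make_iban_alt]
  rw [pv_accNumbers_eq]
  rw [pv_stream _ hD hP 15212827]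
  simp only [pvIntSandwich?, if_pos hg, Option.getD_some]
  rw [show (('1'::'5'::'2'::'1'::'2'::'8'::'2'::'7'::[]) ++
        (curr.toList ++ acc_type.toList ++ number.toList).flatMap pvExpand ++
        ('1'::'1'::'3'::'4'::'0'::'0'::[])) =
      (('1'::'5'::'2'::'1'::'2'::'8'::'2'::'7'::[]) ++
        (curr.toList ++ acc_type.toList ++ number.toList).flatMap pvExpand) ++
        ('1'::'1'::'3'::'4'::'0'::'0'::[]) from rfl]
  rw [pv_val_append, pv_val_append, pv_val_suffix]
  rw [show pvDigitsVal 0 ('1'::'5'::'2'::'1'::'2'::'8'::'2'::'7'::[]) = 15212827 from by decide]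
  rw [pv_mod_absorb]

-- ===== VERDICT (by name: the statement is the Claim_ definition above) =====
theorem make_iban_spec : Claim_equal_make_iban := by
  intro curr acc_type number hDom hPre
  unfold Spec_make_iban
  exact pv_main curr acc_type number hDom hPre
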